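-- pv_equiv track=rewrite | github.com/retro-foundry/icepanic | tools/build_procgen_wfc_corpus.py | has_slide_lane_from_block
-- ===== SOURCE A (Python) =====
-- from typing import Dict, Iterable, List, Sequence, Tuple
--
-- GRID_W = 20
--
-- GRID_H = 12
--
-- def has_slide_lane_from_block(rows: Sequence[str], x: int, y: int, min_clear_tiles: int = 2) -> bool:
--     if rows[y][x] not in ("I", "S", "C"):
--         return False
--     for dx, dy in ((0, -1), (0, 1), (-1, 0), (1, 0)):
--         clear = 0
--         cx, cy = x, y
--         while True:
--             nx, ny = cx + dx, cy + dy
--             if nx <= 0 or ny <= 0 or nx >= GRID_W - 1 or ny >= GRID_H - 1: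
--                 break
--             if rows[ny][nx] != ".":
--                 break
--             clear += 1
--             cx, cy = nx, ny
--         if clear >= min_clear_tiles:
--             return True
--     return False
-- ===== SOURCE B (Python) =====
-- GRID_W = 20
-- GRID_H = 12
--
-- def has_slide_lane_from_block(rows, x, y, min_clear_tiles=2):
--     if rows[y][x] not in ("I", "S", "C"):
--         return False
--     return any(
--         all(
--             0 < x + k * dx < GRID_W - 1
--             and 0 < y + k * dy < GRID_H - 1
--             and rows[y + k * dy][x + k * dx] == "."
--             for k in range(1, min_clear_tiles + 1)
--         )
--         for dx, dy in ((0, -1), (0, 1), (-1, 0), (1, 0))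
--     )
-- ===== Notes on version B (the rewrite author's own statement) =====
-- stated objective: simpler
-- what changed: Replaces A's per-direction stateful while-loop that walks the whole lane counting consecutive clear tiles with a direct bounded-window predicate: all() over the first min_clear_tiles cells of each direction (in-bounds and '.'), wrapped in any() over the four directions.
import Mathlib
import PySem

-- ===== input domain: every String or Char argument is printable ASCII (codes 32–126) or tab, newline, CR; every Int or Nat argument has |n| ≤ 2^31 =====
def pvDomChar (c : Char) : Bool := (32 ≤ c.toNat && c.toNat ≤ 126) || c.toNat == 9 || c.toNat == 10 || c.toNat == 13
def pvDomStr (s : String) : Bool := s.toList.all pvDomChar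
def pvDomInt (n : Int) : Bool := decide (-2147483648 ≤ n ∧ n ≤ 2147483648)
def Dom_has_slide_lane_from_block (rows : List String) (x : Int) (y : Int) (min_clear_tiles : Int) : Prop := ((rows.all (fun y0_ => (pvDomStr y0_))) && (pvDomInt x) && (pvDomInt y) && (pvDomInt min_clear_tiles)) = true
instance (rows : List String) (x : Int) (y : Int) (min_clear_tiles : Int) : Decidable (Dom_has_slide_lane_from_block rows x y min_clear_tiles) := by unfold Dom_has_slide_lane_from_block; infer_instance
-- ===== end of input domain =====

-- B replaces A's stateful walk-with-counter per direction by a direct bounded-window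
-- predicate: the first min_clear_tiles cells in a direction must all be in-bounds and '.'
-- (objective: simpler).

-- ===== PORT A =====
-- the while loop of A, as structural recursion on fuel over the same state (cx, cy);
-- 32 fuel is never exhausted (the window admits at most 18 consecutive steps) —
-- the lemmas below never use fuel exhaustion for fuel = 32.
def pvClearRun (rows : List String) (dx dy : Int) : Nat → Int → Int → Int
  | 0, _, _ => 0
  | fuel+1, cx, cy =>
    let nx := cx + dx
    let ny := cy + dy
    if nx ≤ 0 ∨ ny ≤ 0 ∨ 20 - 1 ≤ nx ∨ 12 - 1 ≤ ny then 0
    else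
      match (PySem.List.pyGet? rows ny).bind (fun r => PySem.Str.pyGet? r nx) with
      | none => 0  -- Python raises IndexError here; excluded by Pre_
      | some c => if c ≠ '.' then 0 else 1 + pvClearRun rows dx dy fuel nx ny

def has_slide_lane_from_block (rows : List String) (x : Int) (y : Int) (min_clear_tiles : Int) : Bool :=
  match (PySem.List.pyGet? rows y).bind (fun r => PySem.Str.pyGet? r x) with
  | none => false  -- Python raises IndexError here; excluded by Pre_
  | some c =>
    if c = 'I' ∨ c = 'S' ∨ c = 'C' then
      [((0:Int), (-1:Int)), (0, 1), (-1, 0), (1, 0)].any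
        (fun d => decide (min_clear_tiles ≤ pvClearRun rows d.1 d.2 32 x y))
    else false

-- ===== PORT B =====
-- one cell of the lane window: in-bounds (0 < nx < GRID_W-1, 0 < ny < GRID_H-1) and '.'
def pvCellClear (rows : List String) (nx ny : Int) : Bool :=
  decide (0 < nx ∧ nx < 20 - 1) && decide (0 < ny ∧ ny < 12 - 1) &&
    ((PySem.List.pyGet? rows ny).bind (fun r => PySem.Str.pyGet? r nx) == some '.')

def has_slide_lane_from_block_alt (rows : List String) (x : Int) (y : Int) (min_clear_tiles : Int) : Bool :=
  match (PySem.List.pyGet? rows y).bind (fun r => PySem.Str.pyGet? r x) with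
  | none => false  -- Python raises IndexError here; excluded by Pre_
  | some c =>
    if c = 'I' ∨ c = 'S' ∨ c = 'C' then
      [((0:Int), (-1:Int)), (0, 1), (-1, 0), (1, 0)].any
        (fun d => (PySem.List.pyRange 1 (min_clear_tiles + 1) 1).all
          (fun k => pvCellClear rows (x + k * d.1) (y + k * d.2)))
    else false

-- ===== PRECONDITION & SPEC =====
-- Pre-side helpers (independent of both ports), describing where Python A raises IndexError.
def pvPreWin (nx ny : Int) : Bool := decide (0 < nx ∧ nx < 19 ∧ 0 < ny ∧ ny < 11)
def pvPreLook (rows : List String) (nx ny : Int) : Option Char :=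
  (PySem.List.pyGet? rows ny).bind (fun r => PySem.Str.pyGet? r nx)
def pvPreCellOk (rows : List String) (nx ny : Int) : Bool :=
  pvPreWin nx ny && (pvPreLook rows nx ny == some '.')
-- every in-window cell the walk in direction (dx, dy) reaches has a valid index
def pvPreSafe (rows : List String) (x y dx dy : Int) : Bool :=
  (List.range 19).all fun k =>
    !(decide (1 ≤ k) &&
        ((List.range k).all fun j => !(decide (1 ≤ j)) || pvPreCellOk rows (x + j * dx) (y + j * dy)) &&
        pvPreWin (x + k * dx) (y + k * dy)) ||
    !(pvPreLook rows (x + k * dx) (y + k * dy) == none)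
-- the walk in direction (dx, dy) yields clear ≥ m (no 19 consecutive in-window cells exist)
def pvPreSucc (rows : List String) (x y dx dy m : Int) : Bool :=
  decide (m ≤ 18) &&
    ((List.range 19).all fun k =>
      !(decide (1 ≤ k ∧ (k : Int) ≤ m)) || pvPreCellOk rows (x + k * dx) (y + k * dy))
-- Pre_ holds exactly on the inputs where Python A returns normally: rows[y][x] must be a
-- valid index, and — when it holds a block — each direction A actually walks (i.e. all
-- earlier directions fell short of min_clear_tiles) must only reach in-window cells with
-- valid indices; outside Pre_ Python A raises IndexError.
def Pre_has_slide_lane_from_block (rows : List String) (x : Int) (y : Int) (min_clear_tiles : Int) : Prop :=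
  pvPreLook rows x y ≠ none ∧
  ((pvPreLook rows x y = some 'I' ∨ pvPreLook rows x y = some 'S' ∨ pvPreLook rows x y = some 'C') →
    pvPreSafe rows x y 0 (-1) = true ∧
    (pvPreSucc rows x y 0 (-1) min_clear_tiles = false →
      pvPreSafe rows x y 0 1 = true) ∧
    (pvPreSucc rows x y 0 (-1) min_clear_tiles = false ∧
     pvPreSucc rows x y 0 1 min_clear_tiles = false →
      pvPreSafe rows x y (-1) 0 = true) ∧
    (pvPreSucc rows x y 0 (-1) min_clear_tiles = false ∧
     pvPreSucc rows x y 0 1 min_clear_tiles = false ∧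
     pvPreSucc rows x y (-1) 0 min_clear_tiles = false →
      pvPreSafe rows x y 1 0 = true))
instance (rows : List String) (x : Int) (y : Int) (min_clear_tiles : Int) : Decidable (Pre_has_slide_lane_from_block rows x y min_clear_tiles) := by unfold Pre_has_slide_lane_from_block; infer_instance

def pvWitness_has_slide_lane_from_block : List String × Int × Int × Int := (["."], 0, 0, 2)

def Spec_has_slide_lane_from_block (rows : List String) (x : Int) (y : Int) (min_clear_tiles : Int) (out : Bool) : Prop := out = has_slide_lane_from_block_alt rows x y min_clear_tiles
instance (rows : List String) (x : Int) (y : Int) (min_clear_tiles : Int) (out : Bool) : Decidable (Spec_has_slide_lane_from_block rows x y min_clear_tiles out) := by unfold Spec_has_slide_lane_from_block; infer_instance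

-- ===== CLAIM (what is proved, stated in full; the proofs are below) =====
def Claim_equal_has_slide_lane_from_block : Prop := ∀ (rows : List String) (x : Int) (y : Int) (min_clear_tiles : Int), Dom_has_slide_lane_from_block rows x y min_clear_tiles → Pre_has_slide_lane_from_block rows x y min_clear_tiles → Spec_has_slide_lane_from_block rows x y min_clear_tiles (has_slide_lane_from_block rows x y min_clear_tiles)

-- ===== LEMMAS AND PROOFS =====

theorem pvClearRun_nonneg (rows : List String) (dx dy : Int) :
    ∀ (fuel : Nat) (cx cy : Int), 0 ≤ pvClearRun rows dx dy fuel cx cy := by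
  intro fuel
  induction fuel with
  | zero => intro cx cy; simp [pvClearRun]
  | succ f ih =>
    intro cx cy
    have hrec := ih (cx + dx) (cy + dy)
    simp only [pvClearRun]
    repeat' split
    all_goals omega

theorem pvClearRun_le_fuel (rows : List String) (dx dy : Int) :
    ∀ (fuel : Nat) (cx cy : Int), pvClearRun rows dx dy fuel cx cy ≤ fuel := by
  intro fuel
  induction fuel with
  | zero => intro cx cy; simp [pvClearRun]
  | succ f ih =>
    intro cx cy
    have hrec := ih (cx + dx) (cy + dy)
    simp only [pvClearRun]
    repeat' split
    all_goals omega

-- A's loop body, restated through B's per-cell predicate: one step of the walk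
-- succeeds iff the next cell is pvCellClear.
theorem pvClearRun_step (rows : List String) (dx dy : Int) (fuel : Nat) (cx cy : Int) :
    pvClearRun rows dx dy (fuel + 1) cx cy =
      if pvCellClear rows (cx + dx) (cy + dy) = true
      then 1 + pvClearRun rows dx dy fuel (cx + dx) (cy + dy) else 0 := by
  by_cases hP : cx + dx ≤ 0 ∨ cy + dy ≤ 0 ∨ 20 - 1 ≤ cx + dx ∨ 12 - 1 ≤ cy + dy
  · have hcc : pvCellClear rows (cx + dx) (cy + dy) = false := by
      unfold pvCellClear
      rw [Bool.eq_false_iff]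
      intro hT
      simp only [Bool.and_eq_true, decide_eq_true_eq] at hT
      omega
    simp only [pvClearRun, if_pos hP, hcc, Bool.false_eq_true, if_false]
  · have hP' := hP
    push Not at hP'
    cases h : (PySem.List.pyGet? rows (cy + dy)).bind (fun r => PySem.Str.pyGet? r (cx + dx)) with
    | none =>
      have hcc : pvCellClear rows (cx + dx) (cy + dy) = false := by
        unfold pvCellClear
        rw [h]
        simp
      simp only [pvClearRun, if_neg hP, h, hcc, Bool.false_eq_true, if_false]
    | some c =>
      by_cases hc : c = '.'
      · subst hc
        have hcc : pvCellClear rows (cx + dx) (cy + dy) = true := by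
          unfold pvCellClear
          rw [h]
          simp only [beq_self_eq_true, Bool.and_true, Bool.and_eq_true, decide_eq_true_eq]
          omega
        simp only [pvClearRun, if_neg hP, h, hcc, if_true]
        simp
      · have hcc : pvCellClear rows (cx + dx) (cy + dy) = false := by
          unfold pvCellClear
          rw [h]
          simp [hc]
        simp only [pvClearRun, if_neg hP, h, hcc, Bool.false_eq_true, if_false]
        simp [hc]

-- characterisation of A's counter: the run reaches n iff the first n cells are clear
theorem pvClearRun_iff (rows : List String) (dx dy : Int) :
    ∀ (n fuel : Nat) (cx cy : Int), n ≤ fuel →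
      (((n : Int) ≤ pvClearRun rows dx dy fuel cx cy) ↔
        ∀ k : Nat, 1 ≤ k → k ≤ n →
          pvCellClear rows (cx + (k : Int) * dx) (cy + (k : Int) * dy) = true) := by
  intro n
  induction n with
  | zero =>
    intro fuel cx cy _
    constructor
    · intro _ k h1 h2; omega
    · intro _; exact_mod_cast pvClearRun_nonneg rows dx dy fuel cx cy
  | succ n ih =>
    intro fuel cx cy h
    obtain ⟨f, rfl⟩ : ∃ f, fuel = f + 1 := ⟨fuel - 1, by omega⟩
    rw [pvClearRun_step]
    by_cases hc : pvCellClear rows (cx + dx) (cy + dy) = true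
    · rw [if_pos hc]
      have IH := ih f (cx + dx) (cy + dy) (by omega)
      constructor
      · intro hle k h1 h2
        rcases Nat.lt_or_ge k 2 with hk | hk
        · have hk1 : k = 1 := by omega
          subst hk1
          simpa using hc
        · have hrun : (n : Int) ≤ pvClearRun rows dx dy f (cx + dx) (cy + dy) := by push_cast at hle ⊢; omega
          have := IH.mp hrun (k - 1) (by omega) (by omega)
          have e1 : cx + dx + ((k - 1 : Nat) : Int) * dx = cx + (k : Int) * dx := by
            have : ((k - 1 : Nat) : Int) = (k : Int) - 1 := by omega
            rw [this]; ring
          have e2 : cy + dy + ((k - 1 : Nat) : Int) * dy = cy + (k : Int) * dy := by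
            have : ((k - 1 : Nat) : Int) = (k : Int) - 1 := by omega
            rw [this]; ring
          rwa [e1, e2] at this
      · intro hall
        have hrun : (n : Int) ≤ pvClearRun rows dx dy f (cx + dx) (cy + dy) := by
          apply IH.mpr
          intro k h1 h2
          have := hall (k + 1) (by omega) (by omega)
          have e1 : cx + ((k + 1 : Nat) : Int) * dx = cx + dx + (k : Int) * dx := by push_cast; ring
          have e2 : cy + ((k + 1 : Nat) : Int) * dy = cy + dy + (k : Int) * dy := by push_cast; ring
          rwa [e1, e2] at this
        push_cast; omega
    · rw [if_neg hc]
      constructor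
      · intro hle
        exfalso
        have : ((n : Int) + 1) ≤ 0 := by exact_mod_cast hle
        omega
      · intro hall
        exfalso
        apply hc
        have := hall 1 le_rfl (by omega)
        simpa using this

-- no 20 consecutive clear cells exist in any of the four directions
theorem pvNo20 (rows : List String) (x y dx dy : Int)
    (hdir : (dx = 0 ∧ dy = -1) ∨ (dx = 0 ∧ dy = 1) ∨ (dx = -1 ∧ dy = 0) ∨ (dx = 1 ∧ dy = 0))
    (h1 : pvCellClear rows (x + 1 * dx) (y + 1 * dy) = true)
    (h20 : pvCellClear rows (x + 20 * dx) (y + 20 * dy) = true) : False := by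
  simp only [pvCellClear, Bool.and_eq_true, decide_eq_true_eq] at h1 h20
  obtain ⟨⟨⟨a1, a2⟩, a3, a4⟩, -⟩ := h1
  obtain ⟨⟨⟨b1, b2⟩, b3, b4⟩, -⟩ := h20
  rcases hdir with ⟨hx, hy⟩ | ⟨hx, hy⟩ | ⟨hx, hy⟩ | ⟨hx, hy⟩ <;> subst hx <;> subst hy <;> omega

-- per direction: A's counter test equals B's bounded-window test
theorem pvDir_eq (rows : List String) (x y m dx dy : Int)
    (hdir : (dx = 0 ∧ dy = -1) ∨ (dx = 0 ∧ dy = 1) ∨ (dx = -1 ∧ dy = 0) ∨ (dx = 1 ∧ dy = 0)) :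
    decide (m ≤ pvClearRun rows dx dy 32 x y) =
      (PySem.List.pyRange 1 (m + 1) 1).all (fun k => pvCellClear rows (x + k * dx) (y + k * dy)) := by
  rw [Bool.eq_iff_iff]
  simp only [decide_eq_true_eq, List.all_eq_true]
  constructor
  · intro hle k hk
    rw [PySem.List.mem_pyRange_one] at hk
    have hm1 : (1 : Int) ≤ m := by omega
    have hm32 : m ≤ 32 := by
      by_contra hgt
      have := pvClearRun_le_fuel rows dx dy 32 x y
      push_cast at this; omega
    have hiff := pvClearRun_iff rows dx dy m.toNat 32 x y (by omega)
    have hcast : ((m.toNat : Nat) : Int) = m := by omega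
    rw [hcast] at hiff
    have := hiff.mp hle k.toNat (by omega) (by omega)
    have ek : ((k.toNat : Nat) : Int) = k := by omega
    rwa [ek] at this
  · intro hall
    rcases le_or_gt m 0 with hm | hm
    · calc m ≤ 0 := hm
        _ ≤ _ := pvClearRun_nonneg rows dx dy 32 x y
    · rcases le_or_gt m 32 with hm32 | hm32
      · have hiff := pvClearRun_iff rows dx dy m.toNat 32 x y (by omega)
        have hcast : ((m.toNat : Nat) : Int) = m := by omega
        rw [hcast] at hiff
        apply hiff.mpr
        intro k h1 h2
        exact hall (k : Int) (by rw [PySem.List.mem_pyRange_one]; omega)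
      · exfalso
        exact pvNo20 rows x y dx dy hdir
          (hall 1 (by rw [PySem.List.mem_pyRange_one]; omega))
          (hall 20 (by rw [PySem.List.mem_pyRange_one]; omega))

-- ===== VERDICT (by name: the statement is the Claim_ definition above) =====
theorem has_slide_lane_from_block_spec : Claim_equal_has_slide_lane_from_block := by
  intro rows x y m _ _
  unfold Spec_has_slide_lane_from_block
  unfold has_slide_lane_from_block has_slide_lane_from_block_alt
  cases h : (PySem.List.pyGet? rows y).bind (fun r => PySem.Str.pyGet? r x) with
  | none => rfl
  | some c =>
    simp only
    split
    · simp only [List.any_cons, List.any_nil, Bool.or_false]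
      rw [pvDir_eq rows x y m 0 (-1) (by tauto), pvDir_eq rows x y m 0 1 (by tauto),
          pvDir_eq rows x y m (-1) 0 (by tauto), pvDir_eq rows x y m 1 0 (by tauto)]
    · rfl
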